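-- pv_equiv track=rewrite | github.com/Pietertju/AdventOfCode2024 | Day21/Day21.py | getShortestKeyPadRoute
-- ===== SOURCE A (Python) =====
-- keyPad = {
--     "UP": 0,
--     "A": 1,
--     "LEFT": 2,
--     "DOWN": 3,
--     "RIGHT": 4
-- }
--
-- keyPadQuickRoutes = [
--     [
--         [[]], [["RIGHT"]], [["DOWN", "LEFT"]], [["DOWN"]], [["DOWN", "RIGHT"], ["RIGHT", "DOWN"]]
--     ],
--     [
--         [["LEFT"]], [[]], [["DOWN", "LEFT", "LEFT"]], [["DOWN" ,"LEFT"], ["LEFT", "DOWN"]], [["DOWN"]]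
--     ],
--     [
--         [["RIGHT", "UP"]], [["RIGHT", "RIGHT", "UP"]], [[]], [["RIGHT"]], [["RIGHT", "RIGHT"]]
--     ],
--     [
--         [["UP"]], [["RIGHT", "UP"], ["UP", "RIGHT"]], [["LEFT"]], [[]], [["RIGHT"]]
--     ],
--     [
--         [["UP", "LEFT"], ["LEFT", "UP"]], [["UP"]], [["LEFT", "LEFT"]], [["LEFT"]], [[]]
--     ]
-- ]
--
-- def getShortestKeyPadRoute(routes):
--     shortestRoutes = []
--
--     for route in routes:
--         fromKeyPad = keyPad["A"]
--         fullRoute = []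
--         for move in route:
--             toKeyPad = keyPad[move]
--             keyPadRoute = keyPadQuickRoutes[fromKeyPad][toKeyPad][0]
--             for newMove in keyPadRoute:
--                 fullRoute.append(newMove)
--             fromKeyPad = toKeyPad
--         if len(shortestRoutes) == 0:
--             shortestRoutes.append(fullRoute)
--         elif len(fullRoute) <= len(shortestRoutes[0]):
--             if len(fullRoute) < len(shortestRoutes[0]):
--                 shortestRoutes = []
--                 shortestRoutes.append(fullRoute)
--             else:
--                 shortestRoutes.append(fullRoute)
--     return shortestRoutes
-- ===== SOURCE B (Python) =====
-- # B: flat (fromMove, toMove) -> moves lookup table keyed directly by strings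
-- # (no numeric keypad indices), recursive expansion of each route, then a
-- # two-pass build-all / min-length filter selection.
--
-- _STEP = {
--     ("UP", "UP"): [], ("UP", "A"): ["RIGHT"], ("UP", "LEFT"): ["DOWN", "LEFT"],
--     ("UP", "DOWN"): ["DOWN"], ("UP", "RIGHT"): ["DOWN", "RIGHT"],
--     ("A", "UP"): ["LEFT"], ("A", "A"): [], ("A", "LEFT"): ["DOWN", "LEFT", "LEFT"],
--     ("A", "DOWN"): ["DOWN", "LEFT"], ("A", "RIGHT"): ["DOWN"],
--     ("LEFT", "UP"): ["RIGHT", "UP"], ("LEFT", "A"): ["RIGHT", "RIGHT", "UP"],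
--     ("LEFT", "LEFT"): [], ("LEFT", "DOWN"): ["RIGHT"], ("LEFT", "RIGHT"): ["RIGHT", "RIGHT"],
--     ("DOWN", "UP"): ["UP"], ("DOWN", "A"): ["RIGHT", "UP"], ("DOWN", "LEFT"): ["LEFT"],
--     ("DOWN", "DOWN"): [], ("DOWN", "RIGHT"): ["RIGHT"],
--     ("RIGHT", "UP"): ["UP", "LEFT"], ("RIGHT", "A"): ["UP"],
--     ("RIGHT", "LEFT"): ["LEFT", "LEFT"], ("RIGHT", "DOWN"): ["LEFT"], ("RIGHT", "RIGHT"): [],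
-- }
--
-- def _expand(prev, route):
--     if not route:
--         return []
--     return _STEP[(prev, route[0])] + _expand(route[0], route[1:])
--
-- def getShortestKeyPadRoute(routes):
--     expanded = [_expand("A", r) for r in routes]
--     if not expanded:
--         return []
--     m = min(map(len, expanded))
--     return [r for r in expanded if len(r) == m]
-- ===== Notes on version B (the rewrite author's own statement) =====
-- stated objective: alternative
-- what changed: A's stateful index walk through a nested 5x5 index table plus an inline reset-on-shorter/append-on-equal running minimum is replaced by a flat string-pair lookup table, recursive route expansion, and a build-all-then-filter-by-min two-pass selection.
import Mathlib
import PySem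

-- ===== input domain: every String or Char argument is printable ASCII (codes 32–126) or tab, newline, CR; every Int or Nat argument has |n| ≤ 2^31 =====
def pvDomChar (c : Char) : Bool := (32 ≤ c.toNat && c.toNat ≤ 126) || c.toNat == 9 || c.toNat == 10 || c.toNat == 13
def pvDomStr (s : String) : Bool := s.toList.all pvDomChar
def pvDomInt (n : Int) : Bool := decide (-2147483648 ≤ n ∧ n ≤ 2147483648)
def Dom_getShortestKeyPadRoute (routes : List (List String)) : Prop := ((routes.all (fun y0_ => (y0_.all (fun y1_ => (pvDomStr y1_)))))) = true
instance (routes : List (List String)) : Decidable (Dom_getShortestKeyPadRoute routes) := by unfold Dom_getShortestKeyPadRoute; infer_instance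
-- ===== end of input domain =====

-- B replaces A's stateful index walk through the nested 5x5 table and its inline
-- running-min selection by a flat string-pair step table, recursive expansion and a
-- build-all-then-filter-by-min two-pass selection (alternative decomposition).


-- ===== PORT A =====
-- module constant keyPad (dict lookup; none = KeyError, excluded by Pre_)
def keyIdx (s : String) : Option Nat :=
  if s == "UP" then some 0
  else if s == "A" then some 1
  else if s == "LEFT" then some 2
  else if s == "DOWN" then some 3
  else if s == "RIGHT" then some 4
  else none

-- module constant keyPadQuickRoutes
def quickRoutes : List (List (List (List String))) :=
  [ [ [[]], [["RIGHT"]], [["DOWN", "LEFT"]], [["DOWN"]], [["DOWN", "RIGHT"], ["RIGHT", "DOWN"]] ],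
    [ [["LEFT"]], [[]], [["DOWN", "LEFT", "LEFT"]], [["DOWN", "LEFT"], ["LEFT", "DOWN"]], [["DOWN"]] ],
    [ [["RIGHT", "UP"]], [["RIGHT", "RIGHT", "UP"]], [[]], [["RIGHT"]], [["RIGHT", "RIGHT"]] ],
    [ [["UP"]], [["RIGHT", "UP"], ["UP", "RIGHT"]], [["LEFT"]], [[]], [["RIGHT"]] ],
    [ [["UP", "LEFT"], ["LEFT", "UP"]], [["UP"]], [["LEFT", "LEFT"]], [["LEFT"]], [[]] ] ]

-- keyPadQuickRoutes[i][j][0]; i, j are always valid keypad indices (0..4) here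
def cell (i j : Nat) : List String := ((quickRoutes.getD i []).getD j []).getD 0 []

-- inner loop of A: walk route keeping fromKeyPad, appending each cell's moves
def goA (i : Nat) (full : List String) (route : List String) : List String :=
  match route with
  | [] => full
  | m :: rest =>
    match keyIdx m with
    | none => full   -- Python raises KeyError here; such inputs are excluded by Pre_
    | some j => goA j (full ++ cell i j) rest

-- A's running-min update of shortestRoutes
def stepA (shortest : List (List String)) (full : List String) : List (List String) :=
  if shortest.length == 0 then shortest ++ [full]
  else if full.length ≤ (shortest.headD []).length then
    if full.length < (shortest.headD []).length then [full]
    else shortest ++ [full]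
  else shortest

def loopA (shortest : List (List String)) (routes : List (List String)) : List (List String) :=
  match routes with
  | [] => shortest
  | r :: rs => loopA (stepA shortest (goA 1 [] r)) rs

def getShortestKeyPadRoute (routes : List (List String)) : List (List String) :=
  loopA [] routes

-- ===== PORT B =====
-- B's flat _STEP dict keyed by the (fromMove, toMove) string pair directly
def stepB (a b : String) : List String :=
  match a, b with
  | "UP", "UP" => [] | "UP", "A" => ["RIGHT"] | "UP", "LEFT" => ["DOWN", "LEFT"]
  | "UP", "DOWN" => ["DOWN"] | "UP", "RIGHT" => ["DOWN", "RIGHT"]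
  | "A", "UP" => ["LEFT"] | "A", "A" => [] | "A", "LEFT" => ["DOWN", "LEFT", "LEFT"]
  | "A", "DOWN" => ["DOWN", "LEFT"] | "A", "RIGHT" => ["DOWN"]
  | "LEFT", "UP" => ["RIGHT", "UP"] | "LEFT", "A" => ["RIGHT", "RIGHT", "UP"]
  | "LEFT", "LEFT" => [] | "LEFT", "DOWN" => ["RIGHT"] | "LEFT", "RIGHT" => ["RIGHT", "RIGHT"]
  | "DOWN", "UP" => ["UP"] | "DOWN", "A" => ["RIGHT", "UP"] | "DOWN", "LEFT" => ["LEFT"]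
  | "DOWN", "DOWN" => [] | "DOWN", "RIGHT" => ["RIGHT"]
  | "RIGHT", "UP" => ["UP", "LEFT"] | "RIGHT", "A" => ["UP"]
  | "RIGHT", "LEFT" => ["LEFT", "LEFT"] | "RIGHT", "DOWN" => ["LEFT"] | "RIGHT", "RIGHT" => []
  | _, _ => []   -- Python raises KeyError; excluded by Pre_

-- B's recursive _expand
def expandAlt (prev : String) (route : List String) : List String :=
  match route with
  | [] => []
  | m :: rest => stepB prev m ++ expandAlt m rest

def getShortestKeyPadRoute_alt (routes : List (List String)) : List (List String) :=
  match routes.map (expandAlt "A") with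
  | [] => []
  | e :: es =>
    (e :: es).filter (fun r => r.length == (es.map List.length).foldl Nat.min e.length)

-- ===== PRECONDITION & SPEC =====
-- Pre_ excludes routes containing a move outside the keypad, on which A raises KeyError.
def Pre_getShortestKeyPadRoute (routes : List (List String)) : Prop :=
  ∀ route ∈ routes, ∀ m ∈ route, m ∈ (["UP", "A", "LEFT", "DOWN", "RIGHT"] : List String)
instance (routes : List (List String)) : Decidable (Pre_getShortestKeyPadRoute routes) := by
  unfold Pre_getShortestKeyPadRoute; infer_instance
def pvWitness_getShortestKeyPadRoute : List (List String) := [["UP", "A"], ["LEFT"], []]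

def Spec_getShortestKeyPadRoute (routes : List (List String)) (out : List (List String)) : Prop := out = getShortestKeyPadRoute_alt routes
instance (routes : List (List String)) (out : List (List String)) : Decidable (Spec_getShortestKeyPadRoute routes out) := by unfold Spec_getShortestKeyPadRoute; infer_instance

-- ===== CLAIM (what is proved, stated in full; the proofs are below) =====
def Claim_equal_getShortestKeyPadRoute : Prop := ∀ (routes : List (List String)), Dom_getShortestKeyPadRoute routes → Pre_getShortestKeyPadRoute routes → Spec_getShortestKeyPadRoute routes (getShortestKeyPadRoute routes)

-- ===== LEMMAS AND PROOFS =====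

def minL (e : List String) (es : List (List String)) : Nat :=
  es.foldl (fun m r => Nat.min m r.length) e.length

def filt (e : List String) (es : List (List String)) : List (List String) :=
  (e :: es).filter (fun r => r.length == minL e es)

lemma keyIdx_isSome (m : String)
    (h : m ∈ (["UP", "A", "LEFT", "DOWN", "RIGHT"] : List String)) :
    ∃ j, keyIdx m = some j := by
  simp only [List.mem_cons, List.not_mem_nil, or_false] at h
  rcases h with h | h | h | h | h <;> subst h <;> exact ⟨_, rfl⟩

lemma cell_eq_stepB (a b : String)
    (ha : a ∈ (["UP", "A", "LEFT", "DOWN", "RIGHT"] : List String))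
    (hb : b ∈ (["UP", "A", "LEFT", "DOWN", "RIGHT"] : List String)) :
    cell ((keyIdx a).getD 0) ((keyIdx b).getD 0) = stepB a b := by
  fin_cases ha <;> fin_cases hb <;> rfl

lemma goA_expand (route : List String) : ∀ (a : String) (i : Nat) (acc : List String),
    a ∈ (["UP", "A", "LEFT", "DOWN", "RIGHT"] : List String) → keyIdx a = some i →
    (∀ m ∈ route, m ∈ (["UP", "A", "LEFT", "DOWN", "RIGHT"] : List String)) →
    goA i acc route = acc ++ expandAlt a route := by
  induction route with
  | nil => intro a i acc _ _ _; simp [goA, expandAlt]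
  | cons m rest ih =>
    intro a i acc ha hia hall
    have hm := hall m (by simp)
    obtain ⟨j, hj⟩ := keyIdx_isSome m hm
    have hrest : ∀ x ∈ rest, x ∈ (["UP", "A", "LEFT", "DOWN", "RIGHT"] : List String) :=
      fun x hx => hall x (by simp [hx])
    simp only [goA, hj]
    rw [ih m j (acc ++ cell i j) hm hj hrest]
    have hcell : cell i j = stepB a m := by
      have := cell_eq_stepB a m ha hm
      rwa [hia, hj] at this
    simp [expandAlt, hcell]

lemma fmin_le_init (es : List (List String)) : ∀ a : Nat,
    es.foldl (fun m r => Nat.min m r.length) a ≤ a := by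
  induction es with
  | nil => intro a; simp
  | cons r es ih =>
    intro a
    calc es.foldl (fun m r => Nat.min m r.length) (Nat.min a r.length)
        ≤ Nat.min a r.length := ih _
      _ ≤ a := Nat.min_le_left _ _

lemma fmin_le_mem (es : List (List String)) : ∀ (a : Nat) (x : List String), x ∈ es →
    es.foldl (fun m r => Nat.min m r.length) a ≤ x.length := by
  induction es with
  | nil => intro a x hx; simp at hx
  | cons r es ih =>
    intro a x hx
    rcases List.mem_cons.mp hx with h | h
    · subst h
      calc es.foldl (fun m r => Nat.min m r.length) (Nat.min a x.length)
          ≤ Nat.min a x.length := fmin_le_init es _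
        _ ≤ x.length := Nat.min_le_right _ _
    · exact ih _ x h

lemma fmin_attained (es : List (List String)) : ∀ a : Nat,
    es.foldl (fun m r => Nat.min m r.length) a = a ∨
    ∃ x ∈ es, es.foldl (fun m r => Nat.min m r.length) a = x.length := by
  induction es with
  | nil => intro a; left; rfl
  | cons r es ih =>
    intro a
    rcases ih (Nat.min a r.length) with h | ⟨x, hx, hxe⟩
    · simp only [List.foldl_cons]
      rcases Nat.le_total a r.length with hle | hle
      · left; rw [h]; exact Nat.min_eq_left hle
      · right; exact ⟨r, by simp, by rw [h]; exact Nat.min_eq_right hle⟩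
    · right; exact ⟨x, by simp [hx], hxe⟩

lemma minL_le (e : List String) (es : List (List String)) :
    ∀ x ∈ e :: es, minL e es ≤ x.length := by
  intro x hx
  rcases List.mem_cons.mp hx with h | h
  · subst h; exact fmin_le_init es _
  · exact fmin_le_mem es _ x h

lemma minL_attained (e : List String) (es : List (List String)) :
    ∃ x ∈ e :: es, x.length = minL e es := by
  rcases fmin_attained es e.length with h | ⟨x, hx, hxe⟩
  · exact ⟨e, by simp, h.symm⟩
  · exact ⟨x, by simp [hx], hxe.symm⟩

lemma filt_ne_nil (e : List String) (es : List (List String)) : filt e es ≠ [] := by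
  intro hnil
  obtain ⟨x, hx, hxe⟩ := minL_attained e es
  have := List.filter_eq_nil_iff.mp hnil x hx
  simp [hxe] at this

lemma filt_head_len (e : List String) (es : List (List String)) :
    ((filt e es).headD []).length = minL e es := by
  obtain ⟨y, ys, hcons⟩ := List.exists_cons_of_ne_nil (filt_ne_nil e es)
  have hy : y ∈ filt e es := by rw [hcons]; simp
  have := List.mem_filter.mp hy
  rw [hcons]
  simpa using this.2

lemma minL_append (e : List String) (es : List (List String)) (w : List String) :
    minL e (es ++ [w]) = Nat.min (minL e es) w.length := by
  simp [minL, List.foldl_append]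

lemma step_filt (e : List String) (es : List (List String)) (w : List String) :
    stepA (filt e es) w = filt e (es ++ [w]) := by
  have hne : filt e es ≠ [] := filt_ne_nil e es
  have hlen0 : (filt e es).length ≠ 0 := by simpa [List.length_eq_zero_iff] using hne
  have hhead := filt_head_len e es
  unfold stepA
  rw [hhead]
  simp only [beq_iff_eq, hlen0, if_false]
  rcases Nat.lt_trichotomy w.length (minL e es) with hlt | heq | hgt
  · rw [if_pos (Nat.le_of_lt hlt), if_pos hlt]
    unfold filt
    rw [minL_append]
    have h2 : (minL e es).min w.length = w.length := by unfold Nat.min; omega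
    rw [h2]
    rw [show (e :: (es ++ [w])) = (e :: es) ++ [w] by simp, List.filter_append]
    have h1 : (e :: es).filter (fun r => r.length == w.length) = [] := by
      apply List.filter_eq_nil_iff.mpr
      intro x hx
      have := minL_le e es x hx
      simp only [beq_iff_eq]
      omega
    rw [h1]; simp
  · rw [if_pos (Nat.le_of_eq heq), if_neg (by omega)]
    unfold filt
    rw [minL_append]
    have h2 : (minL e es).min w.length = minL e es := by unfold Nat.min; omega
    rw [h2]
    rw [show (e :: (es ++ [w])) = (e :: es) ++ [w] by simp, List.filter_append]
    simp [heq]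
  · rw [if_neg (by omega)]
    unfold filt
    rw [minL_append]
    have h2 : (minL e es).min w.length = minL e es := by unfold Nat.min; omega
    rw [h2]
    rw [show (e :: (es ++ [w])) = (e :: es) ++ [w] by simp, List.filter_append]
    have h1 : ([w] : List (List String)).filter (fun r => r.length == minL e es) = [] := by
      simp only [List.filter_cons, beq_iff_eq]
      rw [if_neg (by omega)]; rfl
    rw [h1]; simp

lemma loopA_filt (rs : List (List String)) : ∀ (e : List String) (es : List (List String)),
    (∀ r ∈ rs, ∀ m ∈ r, m ∈ (["UP", "A", "LEFT", "DOWN", "RIGHT"] : List String)) →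
    loopA (filt e es) rs = filt e (es ++ rs.map (expandAlt "A")) := by
  induction rs with
  | nil => intro e es _; simp [loopA]
  | cons r rs ih =>
    intro e es hpre
    simp only [loopA]
    rw [goA_expand r "A" 1 [] (by simp) rfl (hpre r (by simp)), List.nil_append,
      step_filt e es (expandAlt "A" r)]
    rw [ih e (es ++ [expandAlt "A" r]) (fun x hx => hpre x (by simp [hx]))]
    simp

lemma filt_singleton (w : List String) : filt w [] = [w] := by
  simp [filt, minL, List.filter]

-- ===== VERDICT (by name: the statement is the Claim_ definition above) =====
theorem getShortestKeyPadRoute_spec : Claim_equal_getShortestKeyPadRoute := by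
  intro routes _ hpre
  unfold Spec_getShortestKeyPadRoute
  cases routes with
  | nil => rfl
  | cons r rs =>
    show getShortestKeyPadRoute (r :: rs) = getShortestKeyPadRoute_alt (r :: rs)
    have hstep : stepA [] (goA 1 [] r) = filt (expandAlt "A" r) [] := by
      rw [goA_expand r "A" 1 [] (by simp) rfl (hpre r (by simp)), List.nil_append,
        filt_singleton]
      rfl
    have hmain : getShortestKeyPadRoute (r :: rs) =
        filt (expandAlt "A" r) (rs.map (expandAlt "A")) := by
      show loopA (stepA [] (goA 1 [] r)) rs = _
      rw [hstep, loopA_filt rs (expandAlt "A" r) [] (fun x hx => hpre x (by simp [hx]))]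
      simp
    rw [hmain]
    simp [getShortestKeyPadRoute_alt, filt, minL, List.foldl_map]
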